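-- pv_equiv track=rewrite | github.com/rvarghese0127/TRAE-project | app.py | render_score_dots
-- ===== SOURCE A (Python) =====
-- def render_score_dots(score: int, max_score: int = 5, filled_color: str = "#ff9f43") -> str:
--     """Render score as colored dots."""
--     dots = []
--     for i in range(max_score):
--         if i < score:
--             dots.append(f'<span class="score-dot score-dot-filled" style="background: {filled_color};"></span>')
--         else:
--             dots.append('<span class="score-dot"></span>')
--     return f'<div class="score-dots">{"".join(dots)}</div>'
-- ===== SOURCE B (Python) =====
-- def render_score_dots(score: int, max_score: int = 5, filled_color: str = "#ff9f43") -> str: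
--     """Render score as colored dots (count-then-repeat)."""
--     filled = max(0, min(score, max_score))
--     return (
--         '<div class="score-dots">'
--         + f'<span class="score-dot score-dot-filled" style="background: {filled_color};"></span>' * filled
--         + '<span class="score-dot"></span>' * (max_score - filled)
--         + '</div>'
--     )
-- ===== Notes on version B (the rewrite author's own statement) =====
-- stated objective: simpler
-- what changed: Replaces the per-index loop with an if-branch and list join by computing one clamped filled count and building the result by string repetition of the two span literals.
import Mathlib
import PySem

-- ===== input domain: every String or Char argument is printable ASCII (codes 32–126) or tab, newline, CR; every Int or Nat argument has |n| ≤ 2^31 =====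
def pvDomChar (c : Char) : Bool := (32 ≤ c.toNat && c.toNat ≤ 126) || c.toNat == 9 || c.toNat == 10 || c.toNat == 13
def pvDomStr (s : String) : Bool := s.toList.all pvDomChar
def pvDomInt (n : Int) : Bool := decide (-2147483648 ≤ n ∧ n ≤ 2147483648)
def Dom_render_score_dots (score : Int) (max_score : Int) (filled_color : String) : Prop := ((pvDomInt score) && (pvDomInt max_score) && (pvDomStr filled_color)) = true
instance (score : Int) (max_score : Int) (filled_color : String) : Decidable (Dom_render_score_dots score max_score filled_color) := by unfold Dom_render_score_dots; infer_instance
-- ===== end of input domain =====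

-- B replaces A's per-index loop-and-branch with one clamped filled count and string repetition (simpler decomposition).


-- ===== PORT A =====
-- strings handled as List Char (PySem.Chars); the f-string is literal ++ interpolant ++ literal
def render_score_dots (score : Int) (max_score : Int) (filled_color : String) : String :=
  let dots : List (List Char) :=
    (PySem.List.pyRange 0 max_score 1).foldl
      (fun dots i =>
        if i < score then
          dots ++ ["<span class=\"score-dot score-dot-filled\" style=\"background: ".toList
                    ++ filled_color.toList ++ ";\"></span>".toList]
        else
          dots ++ ["<span class=\"score-dot\"></span>".toList]) []
  String.ofList ("<div class=\"score-dots\">".toList ++ PySem.Chars.join [] dots ++ "</div>".toList)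

-- ===== PORT B =====
-- filled = max(0, min(score, max_score)); 'str * n' is flatten of replicate (n ≤ 0 gives "")
def render_score_dots_alt (score : Int) (max_score : Int) (filled_color : String) : String :=
  let filled : Int := max 0 (min score max_score)
  String.ofList ("<div class=\"score-dots\">".toList
    ++ (List.replicate filled.toNat
          ("<span class=\"score-dot score-dot-filled\" style=\"background: ".toList
            ++ filled_color.toList ++ ";\"></span>".toList)).flatten
    ++ (List.replicate (max_score - filled).toNat ("<span class=\"score-dot\"></span>".toList)).flatten
    ++ "</div>".toList)

-- ===== PRECONDITION & SPEC =====
def Spec_render_score_dots (score : Int) (max_score : Int) (filled_color : String) (out : String) : Prop := out = render_score_dots_alt score max_score filled_color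
instance (score : Int) (max_score : Int) (filled_color : String) (out : String) : Decidable (Spec_render_score_dots score max_score filled_color out) := by unfold Spec_render_score_dots; infer_instance

-- ===== CLAIM (what is proved, stated in full; the proofs are below) =====
def Claim_equal_render_score_dots : Prop := ∀ (score : Int) (max_score : Int) (filled_color : String), Dom_render_score_dots score max_score filled_color → Spec_render_score_dots score max_score filled_color (render_score_dots score max_score filled_color)

-- ===== LEMMAS AND PROOFS =====

-- a constant map over pyRange is a replicate
theorem pv_map_pyRange_const {α : Type} (a b : Int) (c : α) :
    (PySem.List.pyRange a b 1).map (fun _ => c) = List.replicate (b - a).toNat c := by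
  rw [List.map_const', PySem.List.length_pyRange_one]

-- join with empty separator is flatten
theorem pv_join_nil_flatten : ∀ (l : List (List Char)), PySem.Chars.join [] l = l.flatten
  | [] => by simp [PySem.Chars.join, List.intercalate]
  | [x] => by simp [PySem.Chars.join, List.intercalate]
  | x :: y :: ys => by
      rw [PySem.Chars.join_cons_cons, pv_join_nil_flatten (y :: ys)]; simp

-- the A-side loop body, split at the clamp point
theorem pv_core (score max_score : Int) (F E : List Char) :
    PySem.Chars.join []
      ((PySem.List.pyRange 0 max_score 1).foldl
        (fun dots i => if i < score then dots ++ [F] else dots ++ [E]) []) =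
      (List.replicate (max 0 (min score max_score)).toNat F).flatten
        ++ (List.replicate (max_score - max 0 (min score max_score)).toNat E).flatten := by
  have hfold : ∀ (l : List Int) (acc : List (List Char)),
      l.foldl (fun dots i => if i < score then dots ++ [F] else dots ++ [E]) acc
        = acc ++ l.map (fun i => if i < score then F else E) := by
    intro l
    induction l with
    | nil => simp
    | cons x xs ih =>
      intro acc
      simp only [List.foldl_cons, List.map_cons, ih]
      by_cases h : x < score <;> simp [h]
  set f : Int := max 0 (min score max_score) with hf
  have h0 : 0 ≤ f := le_max_left _ _
  rcases le_or_gt max_score 0 with hm | hm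
  · have hf0 : f = 0 := by omega
    have hn : (max_score - (0:Int)).toNat = 0 := by omega
    rw [PySem.List.pyRange_one_eq_nil hm, hf0, hn]
    simp [PySem.Chars.join, List.intercalate]
  · have hfm : f ≤ max_score := by omega
    rw [hfold, PySem.List.pyRange_one_append 0 f max_score h0 hfm, List.map_append]
    have h1 : (PySem.List.pyRange 0 f 1).map (fun i => if i < score then F else E)
        = (PySem.List.pyRange 0 f 1).map (fun _ => F) := by
      apply List.map_congr_left
      intro i hi
      rw [PySem.List.mem_pyRange_one] at hi
      have : i < score := by omega
      simp [this]
    have h2 : (PySem.List.pyRange f max_score 1).map (fun i => if i < score then F else E)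
        = (PySem.List.pyRange f max_score 1).map (fun _ => E) := by
      apply List.map_congr_left
      intro i hi
      rw [PySem.List.mem_pyRange_one] at hi
      have : ¬ i < score := by omega
      simp [this]
    have hz : f - 0 = f := sub_zero f
    rw [h1, h2, pv_map_pyRange_const, pv_map_pyRange_const, hz, List.nil_append,
        pv_join_nil_flatten, List.flatten_append]

-- ===== VERDICT (by name: the statement is the Claim_ definition above) =====
theorem render_score_dots_spec : Claim_equal_render_score_dots := by
  intro score max_score filled_color _
  unfold Spec_render_score_dots render_score_dots render_score_dots_alt
  simp only []
  rw [pv_core]; simp [List.append_assoc]
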